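-- pv_equiv track=rewrite | github.com/try-except-try-accept/advent_of_code_2023 | day14b.py | sum_load
-- ===== SOURCE A (Python) =====
-- def sum_load(data):
--     total = 0
--     for y, row in enumerate(data):
--         mul = len(data)-y
--         this_row = 0
--         for i, char in enumerate(row):
--             this_row += mul * (1 if char == "O" else 0)
--
--
--         total += this_row
--     return total
-- ===== SOURCE B (Python) =====
-- def sum_load(data):
--     seen = 0
--     total = 0
--     for row in data:
--         seen += sum(c == "O" for c in row)
--         total += seen
--     return total
-- ===== Notes on version B (the rewrite author's own statement) =====
-- stated objective: alternative
-- what changed: B replaces the per-row positional weight len(data)-y by a running prefix-sum accumulator: it adds each row's 'O' count into a running counter and sums that counter, using the identity sum_y (n-y)*count_y = sum_y (cumulative count up to row y); B never computes len(data) or a multiplier.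
import Mathlib
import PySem

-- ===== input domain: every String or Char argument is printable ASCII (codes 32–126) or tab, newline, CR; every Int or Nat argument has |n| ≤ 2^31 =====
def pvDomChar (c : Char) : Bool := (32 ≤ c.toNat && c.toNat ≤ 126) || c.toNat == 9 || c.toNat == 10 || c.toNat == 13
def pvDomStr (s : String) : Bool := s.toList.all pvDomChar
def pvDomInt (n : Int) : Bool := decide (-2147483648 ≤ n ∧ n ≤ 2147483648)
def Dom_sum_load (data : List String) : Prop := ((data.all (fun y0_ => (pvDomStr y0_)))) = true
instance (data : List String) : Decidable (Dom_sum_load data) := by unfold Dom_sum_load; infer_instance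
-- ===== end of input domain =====

-- B replaces the explicit positional weight len(data)-y by a running prefix-sum accumulator (alternative decomposition, same cost).

-- ===== PORT A =====
def sum_load (data : List String) : Int :=
  (PySem.List.enumerate data).foldl
    (fun total yr =>
      let mul : Int := (data.length : Int) - yr.1
      let this_row : Int :=
        yr.2.toList.foldl (fun acc c => acc + mul * (if c = 'O' then 1 else 0)) 0
      total + this_row) 0

-- ===== PORT B =====
def sum_load_alt (data : List String) : Int :=
  (data.foldl
    (fun (p : Int × Int) row =>
      let seen := p.1 + (row.toList.count 'O' : Int)
      (seen, p.2 + seen)) (0, 0)).2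

-- ===== PRECONDITION & SPEC =====
def Spec_sum_load (data : List String) (out : Int) : Prop := out = sum_load_alt data
instance (data : List String) (out : Int) : Decidable (Spec_sum_load data out) := by unfold Spec_sum_load; infer_instance

-- ===== CLAIM (what is proved, stated in full; the proofs are below) =====
def Claim_equal_sum_load : Prop := ∀ (data : List String), Dom_sum_load data → Spec_sum_load data (sum_load data)

-- ===== LEMMAS AND PROOFS =====

-- weighted sum: wsum n [c0, c1, …] = n*c0 + (n-1)*c1 + …
def wsum : Int → List Int → Int
  | _, [] => 0
  | n, c :: cs => n * c + wsum (n - 1) cs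

def countO (row : String) : Int := (row.toList.count 'O' : Int)

theorem inner_count (mul : Int) (cs : List Char) (a : Int) :
    cs.foldl (fun acc c => acc + mul * (if c = 'O' then 1 else 0)) a
      = a + mul * (cs.count 'O' : Int) := by
  induction cs generalizing a with
  | nil => simp
  | cons c cs ih =>
    simp only [List.foldl_cons, ih, List.count_cons]
    by_cases h : c = 'O'
    · simp only [h, beq_self_eq_true, if_true]
      push_cast; ring
    · simp only [h, if_false]
      simp [h]

theorem foldA (rows : List String) (n : Int) (s : Int) (t : Int) :
    (PySem.List.enumerate rows s).foldl
      (fun total yr =>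
        let mul : Int := n - yr.1
        let this_row : Int :=
          yr.2.toList.foldl (fun acc c => acc + mul * (if c = 'O' then 1 else 0)) 0
        total + this_row) t
      = t + wsum (n - s) (rows.map countO) := by
  induction rows generalizing s t with
  | nil => simp [PySem.List.enumerate_nil, wsum]
  | cons r rows ih =>
    rw [PySem.List.enumerate_cons, List.foldl_cons, ih]
    simp only [inner_count, List.map_cons, wsum, countO]
    rw [show n - (s + 1) = n - s - 1 from by omega]
    ring

theorem foldB (cs : List Int) (s t : Int) :
    (cs.foldl (fun (p : Int × Int) c => (p.1 + c, p.2 + (p.1 + c))) (s, t)).2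
      = t + (cs.length : Int) * s + wsum (cs.length : Int) cs := by
  induction cs generalizing s t with
  | nil => simp [wsum]
  | cons c cs ih =>
    simp only [List.foldl_cons, ih, wsum, List.length_cons]
    push_cast
    rw [show ((cs.length : Int) + 1 - 1) = (cs.length : Int) from by ring]
    ring

-- ===== VERDICT (by name: the statement is the Claim_ definition above) =====
theorem sum_load_spec : Claim_equal_sum_load := by
  intro data _
  show sum_load data = sum_load_alt data
  unfold sum_load sum_load_alt
  rw [foldA data (data.length : Int) 0 0]
  show 0 + wsum ((data.length : Int) - 0) (data.map countO)
      = (data.foldl (fun (p : Int × Int) row =>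
          (p.1 + countO row, p.2 + (p.1 + countO row))) (0, 0)).2
  rw [show (data.foldl (fun (p : Int × Int) row =>
          (p.1 + countO row, p.2 + (p.1 + countO row))) (0, 0))
        = ((data.map countO).foldl (fun (p : Int × Int) c => (p.1 + c, p.2 + (p.1 + c))) (0, 0))
      from by rw [List.foldl_map]]
  rw [foldB]
  simp
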